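-- pv_equiv track=rewrite | github.com/szymonsadowski3/LingEngine | services/nfa-to-grammar/converter.py | convert_array_transitions_to_common
-- ===== SOURCE A (Python) =====
-- def convert_array_transitions_to_common(array_transitions):
--     transition_entries = array_transitions['transitions']
--
--     new_transition_structure = {}
--
--     for transition_entry in transition_entries:
--         input_state = transition_entry[0]
--         signal = transition_entry[1]
--         output_states = transition_entry[2]
--
--         if input_state not in new_transition_structure:
--             new_transition_structure[input_state] = {}
--
--         new_transition_structure[input_state][signal] = output_states
--
--     return new_transition_structure
-- ===== SOURCE B (Python) =====
-- def convert_array_transitions_to_common(array_transitions):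
--     entries = array_transitions['transitions']
--     states = list(dict.fromkeys(e[0] for e in entries))
--     return {s: {e[1]: e[2] for e in entries if e[0] == s} for s in states}
-- ===== Notes on version B (the rewrite author's own statement) =====
-- stated objective: simpler
-- what changed: Replaces the single-pass mutable nested-dict build with an ordered-dedup of input states followed by a nested dict comprehension that rescans the transition list once per distinct state (O(n*k) instead of O(n), same result including key order and last-write-wins on duplicate (state, signal) pairs).
import Mathlib
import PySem

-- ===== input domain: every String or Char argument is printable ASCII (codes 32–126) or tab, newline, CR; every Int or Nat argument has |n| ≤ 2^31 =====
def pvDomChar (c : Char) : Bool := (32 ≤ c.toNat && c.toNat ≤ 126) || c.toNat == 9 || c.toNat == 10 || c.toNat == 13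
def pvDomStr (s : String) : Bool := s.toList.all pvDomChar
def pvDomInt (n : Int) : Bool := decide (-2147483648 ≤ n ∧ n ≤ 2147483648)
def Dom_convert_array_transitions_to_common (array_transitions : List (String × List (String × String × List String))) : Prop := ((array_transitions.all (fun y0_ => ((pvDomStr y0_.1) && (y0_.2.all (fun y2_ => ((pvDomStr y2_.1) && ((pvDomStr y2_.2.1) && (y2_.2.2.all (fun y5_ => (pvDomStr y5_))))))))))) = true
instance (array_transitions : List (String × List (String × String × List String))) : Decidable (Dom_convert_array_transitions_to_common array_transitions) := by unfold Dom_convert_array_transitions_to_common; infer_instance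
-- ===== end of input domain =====

-- B replaces A's single-pass mutable nested-dict build by an ordered dedup of the
-- input states followed by a per-state rescan of the transition list (objective:
-- simpler, a two-line comprehension; not faster).

-- ===== PORT A =====
-- literal port of A: one pass, inserting an empty inner dict on first sight of a state,
-- then overwriting new[state][signal] := output_states
def convert_array_transitions_to_common (array_transitions : List (String × List (String × String × List String))) : List (String × List (String × List String)) :=
  match (PySem.Dict.mk array_transitions).get? "transitions" with
  | none => []  -- unreachable under Pre_ (Python raises KeyError here)
  | some transition_entries =>
    let d := transition_entries.foldl
      (fun (d : PySem.Dict String (PySem.Dict String (List String))) e =>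
        let d := if d.contains e.1 then d else d.insert e.1 PySem.Dict.empty
        d.insert e.1 ((d.getD e.1 PySem.Dict.empty).insert e.2.1 e.2.2))
      PySem.Dict.empty
    d.items.map (fun p => (p.1, p.2.items))

-- ===== PORT B =====
-- literal port of B: ordered dedup of states, then a nested comprehension filtering
-- the entry list once per state
def convert_array_transitions_to_common_alt (array_transitions : List (String × List (String × String × List String))) : List (String × List (String × List String)) :=
  match (PySem.Dict.mk array_transitions).get? "transitions" with
  | none => []  -- unreachable under Pre_
  | some entries =>
    let states := PySem.List.dedup (entries.map (·.1))
    states.map (fun s =>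
      (s, ((entries.filter (fun e => e.1 == s)).foldl
            (fun (d : PySem.Dict String (List String)) e => d.insert e.2.1 e.2.2)
            PySem.Dict.empty).items))

-- ===== PRECONDITION & SPEC =====
-- Pre_ excludes exactly the inputs without a "transitions" key, on which Python A raises KeyError.
def Pre_convert_array_transitions_to_common (array_transitions : List (String × List (String × String × List String))) : Prop :=
  "transitions" ∈ array_transitions.map Prod.fst
instance (array_transitions : List (String × List (String × String × List String))) : Decidable (Pre_convert_array_transitions_to_common array_transitions) := by unfold Pre_convert_array_transitions_to_common; infer_instance
def pvWitness_convert_array_transitions_to_common : (List (String × List (String × String × List String))) :=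
  [("transitions", [("q0", "a", ["q1"]), ("q0", "b", ["q0", "q1"]), ("q1", "a", [])])]

def Spec_convert_array_transitions_to_common (array_transitions : List (String × List (String × String × List String))) (out : List (String × List (String × List String))) : Prop := out = convert_array_transitions_to_common_alt array_transitions
instance (array_transitions : List (String × List (String × String × List String))) (out : List (String × List (String × List String))) : Decidable (Spec_convert_array_transitions_to_common array_transitions out) := by unfold Spec_convert_array_transitions_to_common; infer_instance

-- ===== CLAIM (what is proved, stated in full; the proofs are below) =====
def Claim_equal_convert_array_transitions_to_common : Prop := ∀ (array_transitions : List (String × List (String × String × List String))), Dom_convert_array_transitions_to_common array_transitions → Pre_convert_array_transitions_to_common array_transitions → Spec_convert_array_transitions_to_common array_transitions (convert_array_transitions_to_common array_transitions)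

-- ===== LEMMAS AND PROOFS =====

-- A's loop body, named for the proofs
def pvStepA (d : PySem.Dict String (PySem.Dict String (List String))) (e : String × String × List String) : PySem.Dict String (PySem.Dict String (List String)) :=
  let d := if d.contains e.1 then d else d.insert e.1 PySem.Dict.empty
  d.insert e.1 ((d.getD e.1 PySem.Dict.empty).insert e.2.1 e.2.2)

-- B's inner dict for one state
def pvInner (s : String) (l : List (String × String × List String)) : PySem.Dict String (List String) :=
  (l.filter (fun e => e.1 == s)).foldl (fun d e => d.insert e.2.1 e.2.2) PySem.Dict.empty

lemma pvInner_append (s : String) (l : List (String × String × List String)) (e : String × String × List String) :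
    pvInner s (l ++ [e]) = if e.1 = s then (pvInner s l).insert e.2.1 e.2.2 else pvInner s l := by
  unfold pvInner
  rw [List.filter_append]
  by_cases h : e.1 = s
  · simp [h]
  · simp [h, show (e.1 == s) = false by simp [h]]

-- the core invariant: A's dict, as items, is B's comprehension
lemma pvMain (l : List (String × String × List String)) :
    (l.foldl pvStepA PySem.Dict.empty).items
      = (PySem.List.dedup (l.map (·.1))).map (fun s => (s, pvInner s l)) := by
  induction l using List.reverseRecOn with
  | nil => rfl
  | append_singleton l e ih =>
    have hnodup : (PySem.List.dedup (l.map (·.1))).Nodup := by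
      rw [PySem.List.dedup_eq_ofList]; exact PySem.Set.nodup_ofList _
    have hkeys : (l.foldl pvStepA PySem.Dict.empty).keys
        = PySem.List.dedup (l.map (·.1)) := by
      simp only [PySem.Dict.keys, ih, List.map_map]
      have : ((fun (x : String × PySem.Dict String (List String)) => x.1) ∘ fun s => (s, pvInner s l)) = id := rfl
      rw [this, List.map_id]
    rw [List.foldl_append, List.foldl_cons, List.foldl_nil]
    rw [List.map_append, PySem.List.dedup_eq_ofList,
      show List.map (fun (x : String × String × List String) => x.1) [e] = [e.1] from rfl,
      PySem.Set.ofList_append_singleton, ← PySem.List.dedup_eq_ofList]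
    by_cases hmem : e.1 ∈ l.map (·.1)
    · -- state already present: in-place overwrite of its inner dict
      have hmemd : e.1 ∈ PySem.List.dedup (l.map (·.1)) := by
        rw [PySem.List.dedup_eq_ofList]; exact (PySem.Set.mem_ofList _ _).2 hmem
      have hcont : (l.foldl pvStepA PySem.Dict.empty).contains e.1 = true := by
        rw [PySem.Dict.contains_iff_mem_keys, hkeys]; exact hmemd
      have hpair : (e.1, pvInner e.1 l) ∈ (l.foldl pvStepA PySem.Dict.empty).items := by
        rw [ih]; exact List.mem_map_of_mem hmemd
      have hget : (l.foldl pvStepA PySem.Dict.empty).getD e.1 PySem.Dict.empty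
          = pvInner e.1 l := by
        exact PySem.Dict.getD_of_mem_items _ hpair (by rw [hkeys]; exact hnodup) _
      rw [PySem.Set.add_of_mem (by rw [PySem.List.dedup_eq_ofList] at hmemd; exact hmemd)]
      simp only [pvStepA, hcont, if_true, hget]
      rw [PySem.Dict.items_insert_of_contains _ _ hcont, ih, List.map_map]
      apply List.map_congr_left
      intro s hs
      by_cases hse : s = e.1
      · subst hse
        simp [pvInner_append]
      · have : (s == e.1) = false := by simp [hse]
        simp [pvInner_append, hse, Ne.symm hse]
    · -- fresh state: appended at the end with a one-entry inner dict
      have hncont : (l.foldl pvStepA PySem.Dict.empty).contains e.1 = false := by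
        rw [PySem.Dict.contains_eq_decide_mem_keys, hkeys]
        simp [PySem.List.dedup_eq_ofList, PySem.Set.mem_ofList, hmem]
      have hinner_nil : pvInner e.1 l = PySem.Dict.empty := by
        unfold pvInner
        have : l.filter (fun e' => e'.1 == e.1) = [] := by
          rw [List.filter_eq_nil_iff]
          intro a ha hq
          have h1 : a.1 = e.1 := by simpa using hq
          exact hmem (h1 ▸ List.mem_map_of_mem ha)
        rw [this]; rfl
      rw [PySem.Set.add_of_not_mem (by simp [PySem.List.dedup_eq_ofList, PySem.Set.mem_ofList, hmem])]
      simp only [pvStepA, hncont, Bool.false_eq_true, if_false]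
      have hcont2 : ((l.foldl pvStepA PySem.Dict.empty).insert e.1 PySem.Dict.empty).contains e.1 = true :=
        PySem.Dict.contains_insert_self _ _ _
      rw [PySem.Dict.getD_insert_self, PySem.Dict.items_insert_of_contains _ _ hcont2,
        PySem.Dict.items_insert_of_not_contains _ _ hncont]
      rw [List.map_append, List.map_append, ih, List.map_map]
      congr 1
      · apply List.map_congr_left
        intro s hs
        have hse : s ≠ e.1 := by
          rintro rfl
          exact hmem (by rw [PySem.List.dedup_eq_ofList] at hs; exact (PySem.Set.mem_ofList _ _).1 hs)
        have : (s == e.1) = false := by simp [hse]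
        simp [pvInner_append, hse, Ne.symm hse]
      · simp [pvInner_append, hinner_nil]

-- ===== VERDICT (by name: the statement is the Claim_ definition above) =====
theorem convert_array_transitions_to_common_spec : Claim_equal_convert_array_transitions_to_common := by
  intro ats _ _
  unfold Spec_convert_array_transitions_to_common
  unfold convert_array_transitions_to_common convert_array_transitions_to_common_alt
  cases h : (PySem.Dict.mk ats).get? "transitions" with
  | none => rfl
  | some entries =>
    simp only []
    rw [show (fun (d : PySem.Dict String (PySem.Dict String (List String))) e =>
        let d := if d.contains e.1 then d else d.insert e.1 PySem.Dict.empty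
        d.insert e.1 ((d.getD e.1 PySem.Dict.empty).insert e.2.1 e.2.2)) = pvStepA from rfl]
    rw [pvMain, List.map_map]
    rfl
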